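-- pv_equiv track=rewrite | github.com/garrett-low/leetcode | python/fem_algos/recursion/generate_anagram.py | ana_inner
-- ===== SOURCE A (Python) =====
-- def ana_inner(input):
--     if len(input) == 1:
--         return [input[0]]
--
--     anagram_list = []
--     anagrams_of_substrings = ana_inner(input[1:])
--     for ana in anagrams_of_substrings:
--         for i in range(len(ana) + 1):
--             new_ana = ana[:i] + input[0] + ana[i:]
--             anagram_list.append(new_ana)
--
--     return anagram_list
-- ===== SOURCE B (Python) =====
-- def ana_inner(input):
--     result = [input[-1]]
--     for c in reversed(input[:-1]):
--         result = [p[:i] + c + p[i:] for p in result for i in range(len(p) + 1)]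
--     return result
-- ===== Notes on version B (the rewrite author's own statement) =====
-- stated objective: alternative
-- what changed: Replaces the recursion on the tail by an iterative left fold: start from the last character and repeatedly insert each earlier character (scanned right-to-left) at every position of every accumulated permutation, which reproduces A's exact output order.
import Mathlib
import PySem

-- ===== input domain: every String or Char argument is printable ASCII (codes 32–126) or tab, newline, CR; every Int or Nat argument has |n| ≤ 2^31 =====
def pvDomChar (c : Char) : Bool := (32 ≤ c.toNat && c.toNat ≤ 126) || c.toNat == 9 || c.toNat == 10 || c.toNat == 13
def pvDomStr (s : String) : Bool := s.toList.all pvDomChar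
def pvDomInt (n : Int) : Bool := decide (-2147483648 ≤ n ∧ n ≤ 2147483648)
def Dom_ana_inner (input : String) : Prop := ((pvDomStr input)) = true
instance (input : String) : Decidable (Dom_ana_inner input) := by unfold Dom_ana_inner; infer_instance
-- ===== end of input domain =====

-- B replaces A's recursion on the tail by an iterative fold over the characters scanned
-- right-to-left, inserting each character at every position of every accumulated permutation
-- (same output, same order; objective: alternative decomposition).


-- ===== PORT A =====
-- Recursive port over List Char. On [] A recurses forever (RecursionError); the [] branch
-- here is only a totality guard, Pre_ excludes the empty string.
-- ana[:i] + input[0] + ana[i:] with 0 ≤ i ≤ len(ana) is take i ++ [c] ++ drop i (exact here).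
def anaGoA : List Char → List String
  | [] => []
  | [c] => [String.ofList [c]]
  | c :: rest =>
      let anagrams_of_substrings := anaGoA rest
      anagrams_of_substrings.foldl (fun anagram_list ana =>
        (List.range (ana.toList.length + 1)).foldl (fun acc i =>
          acc ++ [String.ofList (ana.toList.take i ++ c :: ana.toList.drop i)]) anagram_list) []

def ana_inner (input : String) : List String := anaGoA input.toList

-- ===== PORT B =====
-- Iterative: reversed(input[:-1]) is exactly the tail of input.toList.reverse; the list
-- comprehension is flatMap/map. input[-1] raises on "", guarded by the [] branch (outside Pre_).
def ana_inner_alt (input : String) : List String :=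
  match input.toList.reverse with
  | [] => []
  | last :: restRev =>
      restRev.foldl (fun result c =>
        result.flatMap (fun p =>
          (List.range (p.toList.length + 1)).map (fun i =>
            String.ofList (p.toList.take i ++ c :: p.toList.drop i)))) [String.ofList [last]]

-- ===== PRECONDITION & SPEC =====
-- Pre_ excludes only the empty string, where A raises RecursionError (and B IndexError).
def Pre_ana_inner (input : String) : Prop := input ≠ ""
instance (input : String) : Decidable (Pre_ana_inner input) := by unfold Pre_ana_inner; infer_instance
def pvWitness_ana_inner : String := ("ab")

def Spec_ana_inner (input : String) (out : List String) : Prop := out = ana_inner_alt input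
instance (input : String) (out : List String) : Decidable (Spec_ana_inner input out) := by unfold Spec_ana_inner; infer_instance

-- ===== CLAIM (what is proved, stated in full; the proofs are below) =====
def Claim_equal_ana_inner : Prop := ∀ (input : String), Dom_ana_inner input → Pre_ana_inner input → Spec_ana_inner input (ana_inner input)

-- ===== LEMMAS AND PROOFS =====

-- the one-character insertion step both ports perform
def anaStep (c : Char) (L : List String) : List String :=
  L.flatMap (fun p =>
    (List.range (p.toList.length + 1)).map (fun i =>
      String.ofList (p.toList.take i ++ c :: p.toList.drop i)))

-- A's nested foldl-with-append loop computes anaStep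
theorem anaGoA_cons_cons (c d : Char) (rest : List Char) :
    anaGoA (c :: d :: rest) = anaStep c (anaGoA (d :: rest)) := by
  show (anaGoA (d :: rest)).foldl _ [] = _
  unfold anaStep
  generalize anaGoA (d :: rest) = L
  induction L using List.reverseRecOn with
  | nil => rfl
  | append_singleton xs x ih =>
      rw [List.foldl_append, ih, List.flatMap_append]
      show List.foldl _ (List.flatMap _ xs) [x] = _
      rw [List.foldl_cons, List.foldl_nil, PySem.List.foldl_append_singleton_eq_map]
      simp [List.flatMap]

def anaBrev : List Char → List String
  | [] => []
  | last :: restRev => restRev.foldl (fun result c => anaStep c result) [String.ofList [last]]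

def anaB (cs : List Char) : List String := anaBrev cs.reverse

theorem anaB_eq (input : String) : ana_inner_alt input = anaB input.toList := rfl

theorem anaBrev_concat (c : Char) (xs : List Char) (h : xs ≠ []) :
    anaBrev (xs ++ [c]) = anaStep c (anaBrev xs) := by
  cases xs with
  | nil => exact absurd rfl h
  | cons l t =>
      show List.foldl _ _ (t ++ [c]) = _
      rw [List.foldl_append]
      rfl

theorem anaGoA_eq_anaB : ∀ (cs : List Char), cs ≠ [] → anaGoA cs = anaB cs
  | [], h => absurd rfl h
  | [c], _ => rfl
  | c :: d :: rest, _ => by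
      have ih := anaGoA_eq_anaB (d :: rest) (by simp)
      rw [anaGoA_cons_cons, ih]
      unfold anaB
      rw [show (c :: d :: rest).reverse = (d :: rest).reverse ++ [c] from List.reverse_cons ..,
          anaBrev_concat c _ (by simp)]

-- ===== VERDICT (by name: the statement is the Claim_ definition above) =====
theorem ana_inner_spec : Claim_equal_ana_inner := by
  intro input _ hpre
  unfold Spec_ana_inner ana_inner
  rw [anaB_eq]
  exact anaGoA_eq_anaB input.toList (by
    intro h
    exact hpre (by
      have : input.toList = ("" : String).toList := by simpa using h
      exact String.toList_inj.mp this))
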